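-- pv_equiv track=rewrite | github.com/Caume/HerraduraKEx | SecurityProofsCode/hkex_classical_break.py | eve_recover_sk
-- ===== SOURCE A (Python) =====
-- def rol(x: int, bits: int, n: int) -> int:
--     """Rotate x left by `bits` positions in an n-bit word."""
--     bits %= n
--     return ((x << bits) | (x >> (n - bits))) & ((1 << n) - 1)
--
-- def ror(x: int, bits: int, n: int) -> int:
--     return rol(x, n - bits, n)
--
-- def M(x: int, n: int) -> int:
--     """Apply the FSCX linear operator M = I + ROL(1) + ROR(1)."""
--     return x ^ rol(x, 1, n) ^ ror(x, 1, n)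
--
-- def eve_recover_sk(C: int, C2: int, r: int, n: int) -> int:
--     """
--     Compute sk = S_{r+1} · (C ⊕ C2)
--                = ⊕_{j=0}^{r}  M^j · (C ⊕ C2)
--
--     Cost: O(r · n) = O(n²) bit operations.
--     No private information used — only the two wire values C, C2.
--     """
--     delta = C ^ C2       # the only input Eve needs
--     acc   = 0
--     cur   = delta
--     for _ in range(r + 1):   # j = 0 … r  →  r+1 terms
--         acc ^= cur
--         cur  = M(cur, n)
--     return acc
-- ===== SOURCE B (Python) =====
-- def eve_recover_sk(C, C2, r, n):
--     delta = C ^ C2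
--     if r < 0:
--         return 0
--     # constants of the FSCX step operator I + ROL(1) + ROR(1), computed once
--     mask = (1 << n) - 1
--     b1 = 1 % n
--     b2 = (n - 1) % n
--     nb1 = n - b1
--     nb2 = n - b2
--     seen = {}      # sampled state -> its step index (every 64th state is sampled)
--     pref = []      # pref[j] = XOR of the first j states
--     acc = 0
--     cur = delta
--     j = 0
--     while j <= r:
--         if j % 64 == 0:
--             if cur in seen:
--                 break
--             seen[cur] = j
--         pref.append(acc)
--         acc ^= cur
--         cur = cur ^ ((cur << b1 | cur >> nb1) & mask) ^ ((cur << b2 | cur >> nb2) & mask)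
--         j += 1
--     if j > r:
--         return acc
--     # the state sequence repeats state s at step j: periodic with period p from s on
--     s = seen[cur]
--     p = j - s
--     rest = r - j + 1              # terms still missing from acc
--     cycle = acc ^ pref[s]         # XOR of one full period
--     if (rest // p) % 2:
--         acc ^= cycle
--     return acc ^ pref[s + rest % p] ^ pref[s]
-- ===== Notes on version B (the rewrite author's own statement) =====
-- stated objective: alternative
-- what changed: Instead of blindly performing all r+1 operator applications, B precomputes the step constants once, keeps a prefix-XOR table, samples every 64th state into a hash map to detect a repetition of the iterated FSCX state, and collapses the remaining steps by the parity of the number of full periods, so the loop runs at most min(r+1, ~cycle start + 65*cycle length) times.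
import Mathlib
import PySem

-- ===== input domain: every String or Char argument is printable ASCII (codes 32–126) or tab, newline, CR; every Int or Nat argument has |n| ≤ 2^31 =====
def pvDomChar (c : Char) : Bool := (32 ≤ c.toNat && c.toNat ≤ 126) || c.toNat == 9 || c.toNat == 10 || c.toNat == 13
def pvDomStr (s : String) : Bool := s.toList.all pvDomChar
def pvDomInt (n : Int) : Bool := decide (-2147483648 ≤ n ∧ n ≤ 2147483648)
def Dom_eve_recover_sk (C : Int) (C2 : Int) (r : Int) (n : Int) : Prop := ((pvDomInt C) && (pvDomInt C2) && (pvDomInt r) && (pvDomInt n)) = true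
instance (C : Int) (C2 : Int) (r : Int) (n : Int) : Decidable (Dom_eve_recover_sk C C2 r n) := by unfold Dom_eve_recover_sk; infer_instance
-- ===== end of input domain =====

-- B replaces the blind r+1-fold iteration by cycle detection on the iterated state
-- (hash map of seen states + prefix-XOR table, parity of the remaining full periods);
-- same exact value on every input where A returns.

-- ===== PORT A =====
def pvRol (x : Int) (bits : Int) (n : Int) : Int :=
  let bits := PySem.Int.mod bits n
  PySem.Int.band (PySem.Int.bor (x <<< bits.toNat) (x >>> (n - bits).toNat)) ((1 <<< n.toNat) - 1)

def pvRor (x : Int) (bits : Int) (n : Int) : Int := pvRol x (n - bits) n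

def pvM (x : Int) (n : Int) : Int :=
  PySem.Int.bxor (PySem.Int.bxor x (pvRol x 1 n)) (pvRor x 1 n)

def pvALoop (n : Int) : Nat → Int → Int → Int
  | 0, acc, _ => acc
  | k+1, acc, cur => pvALoop n k (PySem.Int.bxor acc cur) (pvM cur n)

def eve_recover_sk (C : Int) (C2 : Int) (r : Int) (n : Int) : Int :=
  pvALoop n (r + 1).toNat 0 (PySem.Int.bxor C C2)

-- ===== PORT B =====
-- one application of the step operator, from the constants Source B precomputes
def pvStep (x : Int) (b1 : Int) (b2 : Int) (nb1 : Int) (nb2 : Int) (mask : Int) : Int :=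
  PySem.Int.bxor
    (PySem.Int.bxor x (PySem.Int.band (PySem.Int.bor (x <<< b1.toNat) (x >>> nb1.toNat)) mask))
    (PySem.Int.band (PySem.Int.bor (x <<< b2.toNat) (x >>> nb2.toNat)) mask)

-- the while loop of Source B; fuel = r + 1 - j counts the remaining iterations allowed by `j <= r`
def pvBLoop (b1 : Int) (b2 : Int) (nb1 : Int) (nb2 : Int) (mask : Int) :
    Nat → PySem.Dict Int Int → List Int → Int → Int → Int →
    PySem.Dict Int Int × List Int × Int × Int × Int
  | 0, seen, pref, acc, cur, j => (seen, pref, acc, cur, j)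
  | fuel+1, seen, pref, acc, cur, j =>
    if PySem.Int.mod j 64 = 0 then
      if (PySem.Dict.get? seen cur).isNone then
        pvBLoop b1 b2 nb1 nb2 mask fuel (PySem.Dict.insert seen cur j) (pref ++ [acc])
          (PySem.Int.bxor acc cur) (pvStep cur b1 b2 nb1 nb2 mask) (j + 1)
      else (seen, pref, acc, cur, j)
    else
      pvBLoop b1 b2 nb1 nb2 mask fuel seen (pref ++ [acc])
        (PySem.Int.bxor acc cur) (pvStep cur b1 b2 nb1 nb2 mask) (j + 1)

-- the code after the while loop of Source B
def pvBFinish (r : Int) (st : PySem.Dict Int Int × List Int × Int × Int × Int) : Int :=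
  let seen := st.1
  let pref := st.2.1
  let acc := st.2.2.1
  let cur := st.2.2.2.1
  let j := st.2.2.2.2
  if r < j then acc
  else
    -- seen[cur]: present, because the loop exited on membership (KeyError unreachable)
    let s := (PySem.Dict.get? seen cur).getD 0
    let p := j - s
    let rest := r - j + 1
    let cycle := PySem.Int.bxor acc ((PySem.List.pyGet? pref s).getD 0)
    let acc2 := if PySem.Int.mod (PySem.Int.floordiv rest p) 2 ≠ 0 then PySem.Int.bxor acc cycle else acc
    PySem.Int.bxor (PySem.Int.bxor acc2 ((PySem.List.pyGet? pref (s + PySem.Int.mod rest p)).getD 0))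
      ((PySem.List.pyGet? pref s).getD 0)

def eve_recover_sk_alt (C : Int) (C2 : Int) (r : Int) (n : Int) : Int :=
  if r < 0 then 0
  else
    pvBFinish r (pvBLoop (PySem.Int.mod 1 n) (PySem.Int.mod (n - 1) n)
      (n - PySem.Int.mod 1 n) (n - PySem.Int.mod (n - 1) n) ((1 <<< n.toNat) - 1)
      (r + 1).toNat PySem.Dict.empty [] 0 (PySem.Int.bxor C C2) 0)

-- ===== PRECONDITION & SPEC =====
-- Pre_ excludes exactly the inputs where the Python A raises: with r ≥ 0 the loop body runs and
-- rol needs n ≥ 1 (n = 0 is a ZeroDivisionError in `bits %= n`, n < 0 a shift by a negative amount).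
def Pre_eve_recover_sk (C : Int) (C2 : Int) (r : Int) (n : Int) : Prop := r < 0 ∨ 1 ≤ n
instance (C : Int) (C2 : Int) (r : Int) (n : Int) : Decidable (Pre_eve_recover_sk C C2 r n) := by
  unfold Pre_eve_recover_sk; infer_instance

def pvWitness_eve_recover_sk : Int × Int × Int × Int := (5, 9, 7, 4)

def Spec_eve_recover_sk (C : Int) (C2 : Int) (r : Int) (n : Int) (out : Int) : Prop :=
  out = eve_recover_sk_alt C C2 r n
instance (C : Int) (C2 : Int) (r : Int) (n : Int) (out : Int) : Decidable (Spec_eve_recover_sk C C2 r n out) := by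
  unfold Spec_eve_recover_sk; infer_instance

-- ===== CLAIM (what is proved, stated in full; the proofs are below) =====
def Claim_equal_eve_recover_sk : Prop := ∀ (C : Int) (C2 : Int) (r : Int) (n : Int), Dom_eve_recover_sk C C2 r n → Pre_eve_recover_sk C C2 r n → Spec_eve_recover_sk C C2 r n (eve_recover_sk C C2 r n)

-- ===== LEMMAS AND PROOFS =====

-- ---- an xor kit for PySem.Int.bxor (associativity is not in the prelude) ----

def pvMag (a : Int) : Nat := if 0 ≤ a then a.toNat else (-a).toNat - 1
def pvDec (s : Bool) (m : Nat) : Int := if s then -(m : Int) - 1 else (m : Int)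

theorem pv_bxor_eq_dec (a b : Int) :
    PySem.Int.bxor a b = pvDec (xor (decide (a < 0)) (decide (b < 0))) (pvMag a ^^^ pvMag b) := by
  by_cases ha : 0 ≤ a <;> by_cases hb : 0 ≤ b <;>
    simp [PySem.Int.bxor, pvDec, pvMag, ha, hb, not_le.mp, not_le,
      show ¬ a < 0 ↔ 0 ≤ a from not_lt, show ¬ b < 0 ↔ 0 ≤ b from not_lt] <;> omega

theorem pv_mag_dec (s : Bool) (m : Nat) : pvMag (pvDec s m) = m := by
  cases s
  · simp [pvDec, pvMag]
  · have h : ¬ (0 ≤ -(m : Int) - 1) := by omega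
    simp only [pvDec, pvMag, if_true, if_neg h]
    omega


theorem pv_neg_dec (s : Bool) (m : Nat) : decide (pvDec s m < 0) = s := by
  cases s <;> simp [pvDec] <;> omega

theorem pv_bxor_assoc (a b c : Int) :
    PySem.Int.bxor (PySem.Int.bxor a b) c = PySem.Int.bxor a (PySem.Int.bxor b c) := by
  rw [pv_bxor_eq_dec a b, pv_bxor_eq_dec b c, pv_bxor_eq_dec (pvDec _ _) c,
    pv_bxor_eq_dec a (pvDec _ _), pv_mag_dec, pv_neg_dec, pv_mag_dec, pv_neg_dec,
    Nat.xor_assoc, Bool.xor_assoc]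

theorem pv_bxor_zero_left (a : Int) : PySem.Int.bxor 0 a = a := by
  rw [PySem.Int.bxor_comm]; exact PySem.Int.bxor_zero a

theorem pv_bxor_cancel_left (a b : Int) :
    PySem.Int.bxor a (PySem.Int.bxor a b) = b := by
  rw [← pv_bxor_assoc, PySem.Int.bxor_self, pv_bxor_zero_left]

theorem pv_shuffle (x y z : Int) :
    PySem.Int.bxor x (PySem.Int.bxor y z) = PySem.Int.bxor (PySem.Int.bxor y x) z := by
  rw [← pv_bxor_assoc, PySem.Int.bxor_comm x y]

-- ---- the state sequence and its prefix xors ----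

def pvIt (n d : Int) : Nat → Int
  | 0 => d
  | k+1 => pvM (pvIt n d k) n

def pvX (n d : Int) : Nat → Int
  | 0 => 0
  | k+1 => PySem.Int.bxor (pvX n d k) (pvIt n d k)

theorem pvStep_eq (n x : Int) :
    pvStep x (PySem.Int.mod 1 n) (PySem.Int.mod (n - 1) n)
      (n - PySem.Int.mod 1 n) (n - PySem.Int.mod (n - 1) n) ((1 <<< n.toNat) - 1) = pvM x n := rfl

theorem pvIt_shift (n d : Int) (k : Nat) : pvIt n d (k + 1) = pvIt n (pvM d n) k := by
  induction k with
  | zero => rfl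
  | succ k ih => show pvM (pvIt n d (k+1)) n = pvM (pvIt n (pvM d n) k) n; rw [ih]

theorem pvX_shift (n d : Int) (k : Nat) :
    pvX n d (k + 1) = PySem.Int.bxor d (pvX n (pvM d n) k) := by
  induction k with
  | zero => simp [pvX, pvIt, pv_bxor_zero_left, PySem.Int.bxor_zero]
  | succ k ih =>
    show PySem.Int.bxor (pvX n d (k+1)) (pvIt n d (k+1))
        = PySem.Int.bxor d (PySem.Int.bxor (pvX n (pvM d n) k) (pvIt n (pvM d n) k))
    rw [ih, pvIt_shift, pv_bxor_assoc]

theorem pvALoop_eq (n : Int) : ∀ (k : Nat) (acc cur : Int),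
    pvALoop n k acc cur = PySem.Int.bxor acc (pvX n cur k) := by
  intro k
  induction k with
  | zero => intro acc cur; simp [pvALoop, pvX, PySem.Int.bxor_zero]
  | succ k ih =>
    intro acc cur
    show pvALoop n k (PySem.Int.bxor acc cur) (pvM cur n) = _
    rw [ih, pv_bxor_assoc, ← pvX_shift]

-- ---- periodicity of the state sequence ----

theorem pvIt_per (n d : Int) (s P : Nat) (h : pvIt n d (s + P) = pvIt n d s) :
    ∀ k, pvIt n d (s + k + P) = pvIt n d (s + k) := by
  intro k
  induction k with
  | zero => simpa using h
  | succ k ih =>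
    have e1 : s + (k + 1) + P = (s + k + P) + 1 := by omega
    have e2 : s + (k + 1) = (s + k) + 1 := by omega
    rw [e1, e2]
    show pvM (pvIt n d (s + k + P)) n = pvM (pvIt n d (s + k)) n
    rw [ih]

theorem pvX_cyc (n d : Int) (s P : Nat) (h : pvIt n d (s + P) = pvIt n d s) :
    ∀ k, pvX n d (s + k + P)
        = PySem.Int.bxor (pvX n d (s + k)) (PySem.Int.bxor (pvX n d (s + P)) (pvX n d s)) := by
  intro k
  induction k with
  | zero =>
    simp only [Nat.add_zero]
    rw [PySem.Int.bxor_comm (pvX n d (s + P)) (pvX n d s), pv_bxor_cancel_left]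
  | succ k ih =>
    have e1 : s + (k + 1) + P = (s + k + P) + 1 := by omega
    have e2 : s + (k + 1) = (s + k) + 1 := by omega
    rw [e1, e2]
    show PySem.Int.bxor (pvX n d (s + k + P)) (pvIt n d (s + k + P)) = _
    rw [ih, pvIt_per n d s P h k, pv_bxor_assoc,
      PySem.Int.bxor_comm (PySem.Int.bxor (pvX n d (s + P)) (pvX n d s)) (pvIt n d (s + k)),
      ← pv_bxor_assoc]
    rfl

theorem pvX_cyc_mul (n d : Int) (s P : Nat) (h : pvIt n d (s + P) = pvIt n d s) :
    ∀ (q k : Nat), pvX n d (s + k + q * P)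
        = if q % 2 = 1
          then PySem.Int.bxor (pvX n d (s + k)) (PySem.Int.bxor (pvX n d (s + P)) (pvX n d s))
          else pvX n d (s + k) := by
  intro q
  induction q with
  | zero => intro k; simp
  | succ q ih =>
    intro k
    have e1 : s + k + (q + 1) * P = s + (k + q * P) + P := by ring
    rw [e1, pvX_cyc n d s P h (k + q * P), show s + (k + q * P) = s + k + q * P from by omega, ih k]
    by_cases hq : q % 2 = 1
    · have hq1 : ¬ (q + 1) % 2 = 1 := by omega
      simp only [hq, if_pos, hq1, if_neg, if_true, if_false]
      rw [pv_bxor_assoc, PySem.Int.bxor_self, PySem.Int.bxor_zero]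
    · have hq1 : (q + 1) % 2 = 1 := by omega
      simp only [hq, hq1, if_false, if_true]

-- ---- the invariant of Source B's while loop ----

theorem pvBLoop_inv (n d r b1 b2 nb1 nb2 mask : Int)
    (hstep : ∀ x, pvStep x b1 b2 nb1 nb2 mask = pvM x n) (hr : 0 ≤ r) :
    ∀ (fuel j : Nat) (seen : PySem.Dict Int Int),
      (fuel : Int) + (j : Int) = r + 1 →
      (∀ v : Int, PySem.Dict.get? seen v = none ↔ ∀ i : Nat, i < j → i % 64 = 0 → pvIt n d i ≠ v) →
      (∀ i : Nat, i < j → i % 64 = 0 → PySem.Dict.get? seen (pvIt n d i) = some (i : Int)) →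
      (let out := pvBLoop b1 b2 nb1 nb2 mask fuel seen ((List.range j).map (pvX n d))
          (pvX n d j) (pvIt n d j) (j : Int)
       (out.2.2.2.2 = r + 1 ∧ out.2.2.1 = pvX n d (r + 1).toNat) ∨
       (∃ t s : Nat, (t : Int) ≤ r ∧ s < t ∧ pvIt n d s = pvIt n d t ∧
          PySem.Dict.get? out.1 (pvIt n d t) = some (s : Int) ∧
          out.2.1 = (List.range t).map (pvX n d) ∧
          out.2.2.1 = pvX n d t ∧ out.2.2.2.1 = pvIt n d t ∧ out.2.2.2.2 = (t : Int))) := by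
  intro fuel
  induction fuel with
  | zero =>
    intro j seen harith _hnone _hsome
    left
    constructor
    · show (j : Int) = r + 1; omega
    · show pvX n d j = pvX n d (r + 1).toNat
      have : j = (r + 1).toNat := by omega
      rw [this]
  | succ fuel ih =>
    intro j seen harith hnone hsome
    simp only [pvBLoop]
    have hj64 : PySem.Int.mod ((j : Nat) : Int) 64 = ((j % 64 : Nat) : Int) := by
      rw [show (64 : Int) = ((64 : Nat) : Int) from rfl]
      simp [PySem.Int.mod, Int.fmod_eq_emod]
    have hpref : ((List.range j).map (pvX n d)) ++ [pvX n d j]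
        = (List.range (j + 1)).map (pvX n d) := by
      rw [List.range_succ, List.map_append]; rfl
    have hacc : PySem.Int.bxor (pvX n d j) (pvIt n d j) = pvX n d (j + 1) := rfl
    have hcur : pvStep (pvIt n d j) b1 b2 nb1 nb2 mask = pvIt n d (j + 1) := by
      rw [hstep]; rfl
    have hj : (j : Int) + 1 = ((j + 1 : Nat) : Int) := by push_cast; ring
    by_cases hsam : j % 64 = 0
    · rw [hj64, hsam]
      rw [if_pos (by simp)]
      by_cases hmem : (PySem.Dict.get? seen (pvIt n d j)).isNone
      · rw [if_pos hmem]
        have hfresh : ∀ i : Nat, i < j → i % 64 = 0 → pvIt n d i ≠ pvIt n d j :=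
          (hnone (pvIt n d j)).mp (Option.isNone_iff_eq_none.mp hmem)
        rw [hpref, hacc, hcur, hj]
        exact ih (j + 1) (PySem.Dict.insert seen (pvIt n d j) (j : Int))
          (by omega)
          (by
            intro v
            rw [PySem.Dict.get?_insert]
            by_cases hv : v = pvIt n d j
            · subst hv
              simp only [if_pos rfl]
              constructor
              · intro h; exact absurd h (by simp)
              · intro h; exact absurd rfl (h j (by omega) hsam)
            · rw [if_neg hv, hnone v]
              constructor
              · intro h i hi hi64
                rcases Nat.lt_succ_iff_lt_or_eq.mp hi with hi' | hi'
                · exact h i hi' hi64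
                · subst hi'; exact fun he => hv he.symm
              · intro h i hi hi64; exact h i (by omega) hi64)
          (by
            intro i hi hi64
            rcases Nat.lt_succ_iff_lt_or_eq.mp hi with hi' | hi'
            · rw [PySem.Dict.get?_insert, if_neg (hfresh i hi' hi64), hsome i hi' hi64]
            · subst hi'; rw [PySem.Dict.get?_insert, if_pos rfl])
      · rw [if_neg hmem]
        right
        have hne : ¬ ∀ i : Nat, i < j → i % 64 = 0 → pvIt n d i ≠ pvIt n d j := by
          intro h
          exact hmem (Option.isNone_iff_eq_none.mpr ((hnone (pvIt n d j)).mpr h))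
        push_neg at hne
        obtain ⟨s, hs, _hs64, hseq⟩ := hne
        refine ⟨j, s, by push_cast at harith ⊢; omega, hs, hseq, ?_, rfl, rfl, rfl, rfl⟩
        rw [← hseq]; exact hsome s hs _hs64
    · rw [hj64]
      rw [if_neg (by
        intro h
        exact hsam (by exact_mod_cast h))]
      rw [hpref, hacc, hcur, hj]
      exact ih (j + 1) seen
        (by omega)
        (by
          intro v
          rw [hnone v]
          constructor
          · intro h i hi hi64
            rcases Nat.lt_succ_iff_lt_or_eq.mp hi with hi' | hi'
            · exact h i hi' hi64
            · subst hi'; exact absurd hi64 hsam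
          · intro h i hi hi64; exact h i (by omega) hi64)
        (by
          intro i hi hi64
          rcases Nat.lt_succ_iff_lt_or_eq.mp hi with hi' | hi'
          · exact hsome i hi' hi64
          · subst hi'; exact absurd hi64 hsam)

-- ===== VERDICT helper: the main equality =====

theorem eve_recover_sk_eq (C C2 r n : Int) :
    eve_recover_sk C C2 r n = eve_recover_sk_alt C C2 r n := by
  by_cases hr : r < 0
  · have hT : (r + 1).toNat = 0 := by omega
    rw [eve_recover_sk, eve_recover_sk_alt, if_pos hr, hT]
    rfl
  · push_neg at hr
    set d := PySem.Int.bxor C C2 with hd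
    have hA : eve_recover_sk C C2 r n = pvX n d (r + 1).toNat := by
      rw [eve_recover_sk, pvALoop_eq, pv_bxor_zero_left]
    rw [hA, eve_recover_sk_alt, if_neg (by omega)]
    have h0 := pvBLoop_inv n d r (PySem.Int.mod 1 n) (PySem.Int.mod (n - 1) n)
      (n - PySem.Int.mod 1 n) (n - PySem.Int.mod (n - 1) n) ((1 <<< n.toNat) - 1)
      (fun x => pvStep_eq n x) hr (r + 1).toNat 0 PySem.Dict.empty
      (by omega)
      (by intro v; simp [PySem.Dict.get?_empty])
      (by intro i hi; omega)
    simp only [List.range_zero, List.map_nil] at h0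
    have hX0 : pvX n d 0 = 0 := rfl
    have hI0 : pvIt n d 0 = d := rfl
    rw [hX0, hI0] at h0
    set out := pvBLoop (PySem.Int.mod 1 n) (PySem.Int.mod (n - 1) n)
      (n - PySem.Int.mod 1 n) (n - PySem.Int.mod (n - 1) n) ((1 <<< n.toNat) - 1)
      (r + 1).toNat PySem.Dict.empty [] 0 d ((0 : Nat) : Int) with hout
    rcases h0 with ⟨hj, hacc⟩ | ⟨t, s, ht, hst, hseq, hget, hpref, hacc, hcur, hj⟩
    · -- no repetition: the loop ran all r+1 steps
      show pvX n d (r + 1).toNat = pvBFinish r out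
      rw [pvBFinish]
      simp only [hj, hacc]
      rw [if_pos (by omega)]
    · -- a repetition: state t equals state s < t
      show pvX n d (r + 1).toNat = pvBFinish r out
      rw [pvBFinish]
      simp only [hj, hacc, hcur, hget, hpref]
      rw [if_neg (by omega)]
      simp only [Option.getD_some]
      set P := t - s with hP
      set T := (r + 1).toNat with hT
      set N := T - t with hN
      have hPpos : 0 < P := by omega
      have htT : t < T := by omega
      have hNpos : 0 < N := by omega
      have hp : (t : Int) - (s : Int) = ((P : Nat) : Int) := by push_cast; omega
      have hrest : r - (t : Int) + 1 = ((N : Nat) : Int) := by push_cast; omega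
      rw [hp, hrest]
      have hdiv : PySem.Int.floordiv ((N : Nat) : Int) ((P : Nat) : Int) = ((N / P : Nat) : Int) := by
        simp [PySem.Int.floordiv, Int.fdiv_eq_ediv]
      have hmod : PySem.Int.mod ((N : Nat) : Int) ((P : Nat) : Int) = ((N % P : Nat) : Int) := by
        simp [PySem.Int.mod, Int.fmod_eq_emod]
      set q := N / P with hq
      set m := N % P with hm
      have hmP : m < P := Nat.mod_lt _ hPpos
      have hgetS : (PySem.List.pyGet? ((List.range t).map (pvX n d)) ((s : Nat) : Int)).getD 0
          = pvX n d s := by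
        rw [PySem.List.pyGet?_natCast]
        simp [List.getElem?_map, List.getElem?_range, hst]
      have hsm : (s : Int) + ((m : Nat) : Int) = (((s + m : Nat)) : Int) := by push_cast; ring
      have hgetSM : (PySem.List.pyGet? ((List.range t).map (pvX n d)) (((s + m : Nat)) : Int)).getD 0
          = pvX n d (s + m) := by
        rw [PySem.List.pyGet?_natCast]
        simp [List.getElem?_map, List.getElem?_range, show s + m < t from by omega]
      have hper : pvIt n d (s + P) = pvIt n d s := by
        rw [show s + P = t from by omega]; exact hseq.symm
      have hXt : pvX n d t = pvX n d (s + P) := by rw [show s + P = t from by omega]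
      have hTdecomp : T = s + m + (q + 1) * P := by
        have hNqm : N = P * q + m := (Nat.div_add_mod N P).symm
        have hTt : T = t + N := by omega
        have hts : t = s + P := by omega
        rw [hTt, hts, hNqm]; ring
      have hXT := pvX_cyc_mul n d s P hper (q + 1) m
      rw [← hTdecomp] at hXT
      rw [hdiv, hmod, hgetS, hsm, hgetSM, hXt, hXT]
      set Cyc := PySem.Int.bxor (pvX n d (s + P)) (pvX n d s) with hCyc
      by_cases hqp : q % 2 = 1
      · have hmodq : PySem.Int.mod ((q : Nat) : Int) 2 ≠ 0 := by
          have : PySem.Int.mod ((q : Nat) : Int) ((2 : Nat) : Int) = ((q % 2 : Nat) : Int) := by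
            simp [PySem.Int.mod, Int.fmod_eq_emod]
          rw [show ((2:Nat):Int) = (2:Int) from rfl] at this
          rw [this, hqp]; decide
        rw [if_neg (by omega : ¬ (q + 1) % 2 = 1), if_pos hmodq]
        rw [show PySem.Int.bxor (pvX n d (s + P)) Cyc
              = pvX n d s from by rw [hCyc, pv_bxor_cancel_left]]
        rw [PySem.Int.bxor_comm (pvX n d s) (pvX n d (s + m)), pv_bxor_assoc,
          PySem.Int.bxor_self, PySem.Int.bxor_zero]
      · have hmodq : ¬ PySem.Int.mod ((q : Nat) : Int) 2 ≠ 0 := by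
          have h2 : PySem.Int.mod ((q : Nat) : Int) ((2 : Nat) : Int) = ((q % 2 : Nat) : Int) := by
            simp [PySem.Int.mod, Int.fmod_eq_emod]
          rw [show ((2:Nat):Int) = (2:Int) from rfl] at h2
          have : q % 2 = 0 := by omega
          rw [h2, this]; decide
        rw [if_pos (by omega : (q + 1) % 2 = 1), if_neg hmodq]
        rw [hCyc, pv_shuffle]

-- ===== VERDICT (by name: the statement is the Claim_ definition above) =====
theorem eve_recover_sk_spec : Claim_equal_eve_recover_sk := by
  intro C C2 r n _hDom _hPre
  unfold Spec_eve_recover_sk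
  exact eve_recover_sk_eq C C2 r n
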